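-- pv_equiv track=rewrite | github.com/LiangCalvin/test_goneolink | test.py | alien_to_integer
-- ===== SOURCE A (Python) =====
-- def alien_to_integer(alien_numeral):
--     alien_map = {'A': 1, 'B': 5, 'Z': 10, 'L': 50, 'C': 100, 'D': 500, 'R': 1000}
--     result = 0
--     i = 0
--     while i < len(alien_numeral):
--         current_val = alien_map[alien_numeral[i]]
--         if i + 1 < len(alien_numeral):
--             next_val = alien_map[alien_numeral[i + 1]]
--             if current_val < next_val:
--                 result += next_val - current_val
--                 i += 2  # Skip the next character
--             else:
--                 result += current_val
--                 i += 1
--         else: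
--             result += current_val
--             i += 1
--     return result
-- ===== SOURCE B (Python) =====
-- def alien_to_integer(alien_numeral):
--     alien_map = {'A': 1, 'B': 5, 'Z': 10, 'L': 50, 'C': 100, 'D': 500, 'R': 1000}
--     nxt = None   # value of the character just to the right
--     f1 = 0       # total of the suffix starting one char to the right
--     f2 = 0       # total of the suffix starting two chars to the right
--     for ch in reversed(alien_numeral):
--         v = alien_map[ch]
--         if nxt is not None and v < nxt:
--             cur = nxt - v + f2
--         else:
--             cur = v + f1
--         f1, f2 = cur, f1
--         nxt = v
--     return f1
-- ===== Notes on version B (the rewrite author's own statement) =====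
-- stated objective: alternative
-- what changed: Replaces A's left-to-right while loop with look-ahead and i+=2 index skipping by a single right-to-left pass over the reversed string keeping two suffix-total registers, with one add/subtract decision per character and no index arithmetic.
import Mathlib
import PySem

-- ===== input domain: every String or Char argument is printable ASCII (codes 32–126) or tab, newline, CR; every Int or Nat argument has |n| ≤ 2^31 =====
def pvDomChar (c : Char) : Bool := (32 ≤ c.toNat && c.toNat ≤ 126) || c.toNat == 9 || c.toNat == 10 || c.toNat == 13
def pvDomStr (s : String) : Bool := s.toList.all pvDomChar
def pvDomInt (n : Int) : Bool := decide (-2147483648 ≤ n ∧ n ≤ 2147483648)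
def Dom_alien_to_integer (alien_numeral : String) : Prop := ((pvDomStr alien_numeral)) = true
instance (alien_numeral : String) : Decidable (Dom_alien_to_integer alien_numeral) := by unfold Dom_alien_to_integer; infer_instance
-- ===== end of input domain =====

-- B replaces A's index-skipping while loop by a right-to-left two-register suffix scan (alternative decomposition, same cost).

-- ===== PORT A =====
def alienMap : PySem.Dict Char Int :=
  PySem.Dict.ofList [('A', 1), ('B', 5), ('Z', 10), ('L', 50), ('C', 100), ('D', 500), ('R', 1000)]

-- lookup alien_map[s[i]]; Pre_ guarantees the key is present (KeyError excluded), so getD 0 is never the result inside Pre_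
def alienAt (cs : List Char) (i : Nat) : Int :=
  ((PySem.List.pyGet? cs (i : Int)).bind (PySem.Dict.get? alienMap)).getD 0

-- the while loop of A, state (i, result), fuel = cs.length (i advances by ≥ 1 each pass)
def alienLoopA (cs : List Char) : Nat → Nat → Int → Int
  | 0, _, result => result
  | fuel + 1, i, result =>
    if i < cs.length then
      let current_val := alienAt cs i
      if i + 1 < cs.length then
        let next_val := alienAt cs (i + 1)
        if current_val < next_val then
          alienLoopA cs fuel (i + 2) (result + (next_val - current_val))
        else
          alienLoopA cs fuel (i + 1) (result + current_val)
      else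
        alienLoopA cs fuel (i + 1) (result + current_val)
    else result

def alien_to_integer (alien_numeral : String) : Int :=
  alienLoopA alien_numeral.toList alien_numeral.toList.length 0 0

-- ===== PORT B =====
-- one step of B's right-to-left scan: state (nxt, f1, f2)
def alienStepB (st : Option Int × Int × Int) (ch : Char) : Option Int × Int × Int :=
  let v := (PySem.Dict.get? alienMap ch).getD 0
  let cur :=
    match st.1 with
    | some nv => if v < nv then nv - v + st.2.2 else v + st.2.1
    | none => v + st.2.1
  (some v, cur, st.2.1)

def alien_to_integer_alt (alien_numeral : String) : Int :=
  (alien_numeral.toList.reverse.foldl alienStepB (none, 0, 0)).2.1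

-- ===== PRECONDITION & SPEC =====
-- Pre_ excludes exactly the strings containing a character outside the alien map, on which A raises KeyError
def Pre_alien_to_integer (alien_numeral : String) : Prop :=
  alien_numeral.toList.all (fun c => ['A', 'B', 'Z', 'L', 'C', 'D', 'R'].contains c) = true
instance (alien_numeral : String) : Decidable (Pre_alien_to_integer alien_numeral) := by
  unfold Pre_alien_to_integer; infer_instance
def pvWitness_alien_to_integer : String := "CAZ"

def Spec_alien_to_integer (alien_numeral : String) (out : Int) : Prop := out = alien_to_integer_alt alien_numeral
instance (alien_numeral : String) (out : Int) : Decidable (Spec_alien_to_integer alien_numeral out) := by unfold Spec_alien_to_integer; infer_instance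

-- ===== CLAIM (what is proved, stated in full; the proofs are below) =====
def Claim_equal_alien_to_integer : Prop := ∀ (alien_numeral : String), Dom_alien_to_integer alien_numeral → Pre_alien_to_integer alien_numeral → Spec_alien_to_integer alien_numeral (alien_to_integer alien_numeral)

-- ===== LEMMAS AND PROOFS =====

-- reference value of a list of character values (A's recurrence, stated structurally)
def alienF : List Int → Int
  | [] => 0
  | [a] => a
  | a :: b :: t => if a < b then b - a + alienF t else a + alienF (b :: t)

def alienVal (c : Char) : Int := (PySem.Dict.get? alienMap c).getD 0

theorem alienAt_eq (cs : List Char) (i : Nat) (h : i < cs.length) :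
    alienAt cs i = alienVal cs[i] := by
  simp [alienAt, alienVal, PySem.List.pyGet?, PySem.List.pyIdx?, h]

theorem drop_shape (cs : List Char) (i : Nat) (h : i < cs.length) :
    cs.drop i = cs[i] :: cs.drop (i + 1) := by
  simpa using (List.drop_eq_getElem_cons h)

theorem alienLoopA_eq (cs : List Char) (fuel i : Nat) (result : Int)
    (hf : cs.length - i ≤ fuel) :
    alienLoopA cs fuel i result = result + alienF ((cs.drop i).map alienVal) := by
  induction fuel generalizing i result with
  | zero =>
    have : cs.length ≤ i := by omega
    simp [alienLoopA, List.drop_eq_nil_of_le this, alienF]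
  | succ fuel ih =>
    by_cases h : i < cs.length
    · by_cases h1 : i + 1 < cs.length
      · have hd : cs.drop i = cs[i] :: cs[i+1] :: cs.drop (i + 2) := by
          rw [drop_shape cs i h, drop_shape cs (i+1) h1]
        by_cases hlt : alienVal cs[i] < alienVal cs[i+1]
        · rw [alienLoopA]
          simp only [h, if_pos, h1, alienAt_eq cs i h, alienAt_eq cs (i+1) h1, hlt, if_pos]
          rw [ih (i + 2) _ (by omega), hd]
          simp only [List.map_cons, alienF, if_pos hlt]
          ring
        · rw [alienLoopA]
          simp only [h, if_pos, h1, alienAt_eq cs i h, alienAt_eq cs (i+1) h1, hlt, if_neg,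
            if_false]
          rw [ih (i + 1) _ (by omega), hd]
          conv_lhs => rw [drop_shape cs (i + 1) h1]
          simp only [List.map_cons, alienF, if_neg hlt]
          ring
      · have hd : cs.drop i = [cs[i]] := by
          rw [drop_shape cs i h, List.drop_eq_nil_of_le (by omega)]
        rw [alienLoopA]
        simp only [h, if_pos, h1, if_neg, if_false, alienAt_eq cs i h]
        rw [ih (i + 1) _ (by omega), List.drop_eq_nil_of_le (show cs.length ≤ i + 1 by omega), hd]
        simp [alienF]
    · rw [alienLoopA]
      simp [h, List.drop_eq_nil_of_le (show cs.length ≤ i by omega), alienF]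

theorem alienFoldB_eq (cs : List Char) :
    cs.reverse.foldl alienStepB (none, 0, 0) =
      ((cs.map alienVal).head?, alienF (cs.map alienVal), alienF ((cs.map alienVal).tail)) := by
  induction cs with
  | nil => simp [alienF]
  | cons a t ih =>
    rw [List.reverse_cons, List.foldl_append, ih]
    cases t with
    | nil => simp [alienStepB, alienF, alienVal]
    | cons b t' =>
      by_cases hlt : alienVal a < alienVal b
      · simp [alienStepB, alienVal, alienF, hlt]
      · simp [alienStepB, alienVal, alienF, hlt]

-- ===== VERDICT (by name: the statement is the Claim_ definition above) =====
theorem alien_to_integer_spec : Claim_equal_alien_to_integer := by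
  intro s _ _
  unfold Spec_alien_to_integer alien_to_integer alien_to_integer_alt
  rw [alienLoopA_eq s.toList s.toList.length 0 0 (by omega), alienFoldB_eq]
  simp
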